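-- pv_equiv track=rewrite | github.com/tymancjo/fourleg | simulator.py | setLegs
-- ===== SOURCE A (Python) =====
-- def setLegs(Alfa, Beta):
--     """
--     Setting up all legs for the given Alfa and Beta servo angles
--     """
--
--     zeromsg = "<41"
--
--     korekty = []
--     for _ in range(8):
--         korekty.append(0)
--
--     korekty[2] = 10
--     korekty[6] = 10
--
--     for servo in range(8):
--         if servo in [0,2,4,6]:
--             Acor = Beta + korekty[servo]
--             if servo in [0,1,4,5]:
--                 Bcor = 180 - Acor
--             else:
--                 Bcor = Acor
--             zeromsg += f",{int(Bcor)}"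
--         else:
--             Acor = Alfa + korekty[servo]
--             if servo in [0,1,4,5]:
--                 Bcor = 180 - Acor
--             else:
--                 Bcor = Acor
--             zeromsg += f",{int(Bcor)}"
--
--     zeromsg +=">"
--
--     return zeromsg
-- ===== SOURCE B (Python) =====
-- def setLegs(Alfa, Beta):
--     """
--     Setting up all legs for the given Alfa and Beta servo angles
--     """
--     # Each servo value is fixed at write-time: even slots take Beta (+10 at 2,6),
--     # odd slots take Alfa, and slots 0,1,4,5 are mirrored as 180 - value.
--     return (f"<41,{int(180 - Beta)},{int(180 - Alfa)},{int(Beta + 10)},{int(Alfa)}"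
--             f",{int(180 - Beta)},{int(180 - Alfa)},{int(Beta + 10)},{int(Alfa)}>")
-- ===== Notes on version B (the rewrite author's own statement) =====
-- stated objective: simpler
-- what changed: Replaced the correction array, the 8-iteration loop and the per-position branches by a single closed-form formatted string with the eight precomputed expressions.
import Mathlib
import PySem

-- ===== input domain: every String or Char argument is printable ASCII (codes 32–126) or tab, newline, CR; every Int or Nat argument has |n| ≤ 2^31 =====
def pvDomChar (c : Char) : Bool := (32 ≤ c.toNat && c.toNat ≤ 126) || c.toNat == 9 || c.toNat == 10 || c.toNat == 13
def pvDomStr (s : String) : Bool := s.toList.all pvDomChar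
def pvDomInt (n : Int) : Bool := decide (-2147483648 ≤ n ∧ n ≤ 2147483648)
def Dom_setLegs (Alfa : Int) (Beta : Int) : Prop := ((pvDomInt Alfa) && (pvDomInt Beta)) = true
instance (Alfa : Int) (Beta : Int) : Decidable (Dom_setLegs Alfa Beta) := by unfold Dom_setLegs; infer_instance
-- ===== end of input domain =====

-- B replaces A's correction array, loop and branches by one closed-form string; proved equal for all inputs.


-- ===== PORT A =====
def setLegs (Alfa : Int) (Beta : Int) : String :=
  let zeromsg : List Char := "<41".toList
  let korekty : List Int := (List.range 8).foldl (fun acc _ => acc ++ [0]) []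
  let korekty := PySem.List.pySetD korekty 2 10
  let korekty := PySem.List.pySetD korekty 6 10
  let zeromsg := (PySem.List.pyRange 0 8 1).foldl (fun msg servo =>
    if servo ∈ [(0:Int), 2, 4, 6] then
      let Acor := Beta + PySem.List.pyGetD korekty servo 0
      let Bcor := if servo ∈ [(0:Int), 1, 4, 5] then 180 - Acor else Acor
      msg ++ (',' :: PySem.Int.toChars Bcor)
    else
      let Acor := Alfa + PySem.List.pyGetD korekty servo 0
      let Bcor := if servo ∈ [(0:Int), 1, 4, 5] then 180 - Acor else Acor
      msg ++ (',' :: PySem.Int.toChars Bcor)) zeromsg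
  String.ofList (zeromsg ++ ['>'])

-- ===== PORT B =====
def setLegs_alt (Alfa : Int) (Beta : Int) : String :=
  String.ofList ("<41,".toList
    ++ PySem.Int.toChars (180 - Beta) ++ [','] ++ PySem.Int.toChars (180 - Alfa)
    ++ [','] ++ PySem.Int.toChars (Beta + 10) ++ [','] ++ PySem.Int.toChars Alfa
    ++ [','] ++ PySem.Int.toChars (180 - Beta) ++ [','] ++ PySem.Int.toChars (180 - Alfa)
    ++ [','] ++ PySem.Int.toChars (Beta + 10) ++ [','] ++ PySem.Int.toChars Alfa
    ++ ">".toList)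

-- ===== PRECONDITION & SPEC =====
def Spec_setLegs (Alfa : Int) (Beta : Int) (out : String) : Prop := out = setLegs_alt Alfa Beta
instance (Alfa : Int) (Beta : Int) (out : String) : Decidable (Spec_setLegs Alfa Beta out) := by unfold Spec_setLegs; infer_instance

-- ===== CLAIM (what is proved, stated in full; the proofs are below) =====
def Claim_equal_setLegs : Prop := ∀ (Alfa : Int) (Beta : Int), Dom_setLegs Alfa Beta → Spec_setLegs Alfa Beta (setLegs Alfa Beta)

-- ===== LEMMAS AND PROOFS =====

-- ===== VERDICT (by name: the statement is the Claim_ definition above) =====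
theorem setLegs_spec : Claim_equal_setLegs := by
  intro Alfa Beta _
  unfold Spec_setLegs setLegs setLegs_alt
  simp [PySem.List.pyRange, PySem.List.pySetD, PySem.List.pySet?,
        PySem.List.pyGetD, PySem.List.pyIdx?, List.range_succ]
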